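-- pv_equiv track=rewrite | github.com/AcaplaStd/AcaplaCrypt | acrypt/utils.py | b64_to_random
-- ===== SOURCE A (Python) =====
-- def b64_to_random(b64: str):
--     res = ""
--     for i in b64:
--         if 65 <= ord(i) <= 90:
--             res += chr(ord(i) + 1007)
--         elif 97 <= ord(i) <= 103:
--             res += chr(ord(i) + 1001)
--         elif 104 <= ord(i) <= 110:
--             res += chr(ord(i) - 13)
--         elif 111 <= ord(i) <= 114:
--             res += chr(ord(i) - 12)
--         elif 114 <= ord(i) <= 115:
--             res += chr(ord(i) - 56)
--         elif 116 <= ord(i) <= 122: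
--             res += chr(ord(i) - 83)
--         else:
--             res += i
--     return res
-- ===== SOURCE B (Python) =====
-- # The six elif ranges rewritten as disjoint sorted intervals; each character is
-- # located by binary search over the interval starts instead of a branch cascade.
-- _STARTS = [65, 97, 104, 111, 115, 116]
-- _ENDS = [90, 103, 110, 114, 115, 122]
-- _OFFS = [1007, 1001, -13, -12, -56, -83]
--
--
-- def _locate(o):
--     # index of the last interval start <= o, or -1 (bisect_right - 1 by hand)
--     lo, hi = 0, len(_STARTS)
--     while lo < hi:
--         mid = (lo + hi) // 2
--         if o < _STARTS[mid]:
--             hi = mid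
--         else:
--             lo = mid + 1
--     return lo - 1
--
--
-- def b64_to_random(b64: str):
--     out = []
--     for ch in b64:
--         o = ord(ch)
--         k = _locate(o)
--         if k >= 0 and o <= _ENDS[k]:
--             ch = chr(o + _OFFS[k])
--         out.append(ch)
--     return "".join(out)
-- ===== Notes on version B (the rewrite author's own statement) =====
-- stated objective: alternative
-- what changed: The elif cascade is replaced by an interval table: the six ranges become disjoint sorted intervals (the 114/115 overlap resolved into [111,114] and [115,115]) and each character's interval is found by a hand-written binary search over the interval starts, then its offset applied; output is collected in a list and joined once.
import Mathlib
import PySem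

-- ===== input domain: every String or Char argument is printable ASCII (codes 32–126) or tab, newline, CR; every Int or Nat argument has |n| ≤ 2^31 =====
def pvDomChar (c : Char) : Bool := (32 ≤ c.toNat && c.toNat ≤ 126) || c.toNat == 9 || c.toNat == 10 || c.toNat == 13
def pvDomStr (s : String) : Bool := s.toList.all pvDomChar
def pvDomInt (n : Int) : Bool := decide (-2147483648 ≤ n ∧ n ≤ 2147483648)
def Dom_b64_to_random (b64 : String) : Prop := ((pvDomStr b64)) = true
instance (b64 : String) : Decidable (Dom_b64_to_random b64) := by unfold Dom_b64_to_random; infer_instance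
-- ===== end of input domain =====

-- B replaces the elif cascade by disjoint sorted intervals located per character
-- by a hand-written binary search over the interval starts (alternative algorithm).

-- ===== PORT A =====
-- literal transliteration of A's loop: an accumulator string and the elif chain
def b64_to_random (b64 : String) : String :=
  b64.toList.foldl (fun res i =>
    if 65 ≤ i.toNat ∧ i.toNat ≤ 90 then res.push (Char.ofNat (i.toNat + 1007))
    else if 97 ≤ i.toNat ∧ i.toNat ≤ 103 then res.push (Char.ofNat (i.toNat + 1001))
    else if 104 ≤ i.toNat ∧ i.toNat ≤ 110 then res.push (Char.ofNat (i.toNat - 13))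
    else if 111 ≤ i.toNat ∧ i.toNat ≤ 114 then res.push (Char.ofNat (i.toNat - 12))
    else if 114 ≤ i.toNat ∧ i.toNat ≤ 115 then res.push (Char.ofNat (i.toNat - 56))
    else if 116 ≤ i.toNat ∧ i.toNat ≤ 122 then res.push (Char.ofNat (i.toNat - 83))
    else res.push i) ""

-- ===== PORT B =====
-- Source B's module-level interval tables
def pvStarts : List Int := [65, 97, 104, 111, 115, 116]
def pvEnds : List Int := [90, 103, 110, 114, 115, 122]
def pvOffs : List Int := [1007, 1001, -13, -12, -56, -83]

-- Source B's _locate: while-loop binary search, as fuel recursion (fuel bounds the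
-- iteration count; 8 > log2 6 iterations, so it is never exhausted here)
def pvLocateLoop (fuel : Nat) (o : Int) (lo hi : Nat) : Nat :=
  match fuel with
  | 0 => lo
  | fuel + 1 =>
    if lo < hi then
      let mid := (lo + hi) / 2
      if o < pvStarts.getD mid 0 then pvLocateLoop fuel o lo mid
      else pvLocateLoop fuel o (mid + 1) hi
    else lo

def pvLocate (o : Int) : Int := Int.ofNat (pvLocateLoop 8 o 0 pvStarts.length) - 1

-- Source B's loop: build the output char list, then join once
def b64_to_random_alt (b64 : String) : String :=
  String.ofList (b64.toList.foldl (fun out ch =>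
    let o : Int := Int.ofNat ch.toNat
    let k := pvLocate o
    let ch' := if 0 ≤ k ∧ o ≤ pvEnds.getD k.toNat (-1)
               then Char.ofNat (o + pvOffs.getD k.toNat 0).toNat
               else ch
    out ++ [ch']) [])

-- ===== PRECONDITION & SPEC =====
def Spec_b64_to_random (b64 : String) (out : String) : Prop := out = b64_to_random_alt b64
instance (b64 : String) (out : String) : Decidable (Spec_b64_to_random b64 out) := by unfold Spec_b64_to_random; infer_instance

-- ===== CLAIM (what is proved, stated in full; the proofs are below) =====
def Claim_equal_b64_to_random : Prop := ∀ (b64 : String), Dom_b64_to_random b64 → Spec_b64_to_random b64 (b64_to_random b64)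

-- ===== LEMMAS AND PROOFS =====

-- A's per-character translation, factored out for the proof
def pvStepA (i : Char) : Char :=
  if 65 ≤ i.toNat ∧ i.toNat ≤ 90 then Char.ofNat (i.toNat + 1007)
  else if 97 ≤ i.toNat ∧ i.toNat ≤ 103 then Char.ofNat (i.toNat + 1001)
  else if 104 ≤ i.toNat ∧ i.toNat ≤ 110 then Char.ofNat (i.toNat - 13)
  else if 111 ≤ i.toNat ∧ i.toNat ≤ 114 then Char.ofNat (i.toNat - 12)
  else if 114 ≤ i.toNat ∧ i.toNat ≤ 115 then Char.ofNat (i.toNat - 56)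
  else if 116 ≤ i.toNat ∧ i.toNat ≤ 122 then Char.ofNat (i.toNat - 83)
  else i

-- B's per-character translation, factored out for the proof
def pvStepB (ch : Char) : Char :=
  let o : Int := Int.ofNat ch.toNat
  let k := pvLocate o
  if 0 ≤ k ∧ o ≤ pvEnds.getD k.toNat (-1)
  then Char.ofNat (o + pvOffs.getD k.toNat 0).toNat
  else ch

theorem pv_foldl_pushA (l : List Char) (acc : String) :
    (l.foldl (fun res i => res.push (pvStepA i)) acc).toList
      = acc.toList ++ l.map pvStepA := by
  induction l generalizing acc with
  | nil => simp
  | cons x xs ih =>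
      rw [List.foldl_cons, ih, String.toList_push]
      simp

theorem pv_a_eq_map (b64 : String) :
    b64_to_random b64 = String.ofList (b64.toList.map pvStepA) := by
  have h : (fun (res : String) (i : Char) =>
      if 65 ≤ i.toNat ∧ i.toNat ≤ 90 then res.push (Char.ofNat (i.toNat + 1007))
      else if 97 ≤ i.toNat ∧ i.toNat ≤ 103 then res.push (Char.ofNat (i.toNat + 1001))
      else if 104 ≤ i.toNat ∧ i.toNat ≤ 110 then res.push (Char.ofNat (i.toNat - 13))
      else if 111 ≤ i.toNat ∧ i.toNat ≤ 114 then res.push (Char.ofNat (i.toNat - 12))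
      else if 114 ≤ i.toNat ∧ i.toNat ≤ 115 then res.push (Char.ofNat (i.toNat - 56))
      else if 116 ≤ i.toNat ∧ i.toNat ≤ 122 then res.push (Char.ofNat (i.toNat - 83))
      else res.push i)
      = fun (res : String) (i : Char) => res.push (pvStepA i) := by
    funext res i
    simp only [pvStepA]
    split_ifs <;> rfl
  apply String.toList_inj.mp
  rw [b64_to_random, h, pv_foldl_pushA, String.toList_ofList]
  simp

theorem pv_foldl_appendB (l : List Char) (acc : List Char) :
    l.foldl (fun out ch =>
      let o : Int := Int.ofNat ch.toNat
      let k := pvLocate o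
      let ch' := if 0 ≤ k ∧ o ≤ pvEnds.getD k.toNat (-1)
                 then Char.ofNat (o + pvOffs.getD k.toNat 0).toNat
                 else ch
      out ++ [ch']) acc = acc ++ l.map pvStepB := by
  induction l generalizing acc with
  | nil => simp
  | cons x xs ih =>
      rw [List.foldl_cons, ih]
      simp [pvStepB]

theorem pv_b_eq_map (b64 : String) :
    b64_to_random_alt b64 = String.ofList (b64.toList.map pvStepB) := by
  rw [b64_to_random_alt, pv_foldl_appendB]
  simp

set_option maxRecDepth 100000 in
theorem pv_step_eq_of_small : ∀ n : Nat, n < 127 →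
    pvStepA (Char.ofNat n) = pvStepB (Char.ofNat n) := by decide

theorem pv_step_eq (c : Char) (h : pvDomChar c = true) : pvStepA c = pvStepB c := by
  have hlt : c.toNat < 127 := by
    simp only [pvDomChar, Bool.or_eq_true, Bool.and_eq_true, decide_eq_true_eq,
      beq_iff_eq] at h
    omega
  have := pv_step_eq_of_small c.toNat hlt
  rwa [Char.ofNat_toNat] at this

-- ===== VERDICT (by name: the statement is the Claim_ definition above) =====
theorem b64_to_random_spec : Claim_equal_b64_to_random := by
  intro b64 hdom
  unfold Spec_b64_to_random
  rw [pv_a_eq_map, pv_b_eq_map]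
  have hmem : ∀ c ∈ b64.toList, pvStepA c = pvStepB c := fun c hc =>
    pv_step_eq c ((List.all_eq_true.mp hdom) c hc)
  rw [List.map_congr_left hmem]
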